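-- pv_equiv track=rewrite | github.com/ALIYILD/Sozo-Protocol-Generator | src/sozo_generator/evidence/staleness.py | _compute_overall_level
-- ===== SOURCE A (Python) =====
-- def _compute_overall_level(articles_by_level: dict[str, int]) -> str:
--     """Compute overall evidence level from article counts per level.
--
--     Uses the highest level that has at least 2 articles, or falls back
--     to the single highest article if no level has 2+.
--     """
--     if not articles_by_level:
--         return "missing"
--
--     level_rank = {
--         "highest": 5,
--         "high": 4,
--         "medium": 3,
--         "low": 2,
--         "very_low": 1,
--         "missing": 0,
--     }
--
--     # Prefer levels with 2+ articles (robust evidence)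
--     robust = {
--         lvl: count for lvl, count in articles_by_level.items() if count >= 2
--     }
--     pool = robust if robust else articles_by_level
--
--     best_level = max(pool.keys(), key=lambda lvl: level_rank.get(lvl, 0))
--     return best_level
-- ===== SOURCE B (Python) =====
-- def _compute_overall_level(articles_by_level: dict[str, int]) -> str:
--     if not articles_by_level:
--         return "missing"
--     level_rank = {
--         "highest": 5,
--         "high": 4,
--         "medium": 3,
--         "low": 2,
--         "very_low": 1,
--         "missing": 0,
--     }
--     best_overall = None  # (rank, level), first-maximal wins via strict >
--     best_robust = None
--     for lvl, count in articles_by_level.items():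
--         rank = level_rank.get(lvl, 0)
--         if best_overall is None or rank > best_overall[0]:
--             best_overall = (rank, lvl)
--         if count >= 2 and (best_robust is None or rank > best_robust[0]):
--             best_robust = (rank, lvl)
--     return best_robust[1] if best_robust is not None else best_overall[1]
-- ===== Notes on version B (the rewrite author's own statement) =====
-- stated objective: alternative
-- what changed: Replaces A's build-filtered-dict-then-max-over-keys structure with a single pass over the items maintaining two running (rank, level) candidates (best overall and best robust with count>=2), returning the robust one if set; strict > reproduces max's first-maximal tie-break.
import Mathlib
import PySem

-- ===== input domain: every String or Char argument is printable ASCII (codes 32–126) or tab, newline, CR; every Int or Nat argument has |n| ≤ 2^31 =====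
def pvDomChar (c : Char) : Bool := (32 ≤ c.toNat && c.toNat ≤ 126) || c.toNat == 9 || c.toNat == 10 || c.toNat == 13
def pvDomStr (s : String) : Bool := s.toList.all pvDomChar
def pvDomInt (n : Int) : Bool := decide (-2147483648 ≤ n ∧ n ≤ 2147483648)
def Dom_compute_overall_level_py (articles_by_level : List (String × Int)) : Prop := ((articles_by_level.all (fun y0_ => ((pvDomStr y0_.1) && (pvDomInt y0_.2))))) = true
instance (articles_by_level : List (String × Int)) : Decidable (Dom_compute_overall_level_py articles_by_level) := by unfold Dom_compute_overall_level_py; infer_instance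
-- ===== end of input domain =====

-- B replaces A's filter-dict-plus-max structure with one pass tracking two running candidates; objective: alternative (same cost, different decomposition).
-- The dict argument is the association list of its items (distinct keys, insertion order); a dict comprehension keeping some items is their filter.

-- shared helpers of both Pythons: the level_rank table and level_rank.get(lvl, 0)
def pvLevelRank : PySem.Dict String Int :=
  PySem.Dict.ofList [("highest", 5), ("high", 4), ("medium", 3), ("low", 2), ("very_low", 1), ("missing", 0)]

def pvKey (lvl : String) : Int := pvLevelRank.getD lvl 0

-- ===== PORT A =====
def compute_overall_level_py (articles_by_level : List (String × Int)) : String :=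
  if articles_by_level = [] then "missing"
  else
    -- robust = {lvl: count for lvl, count in articles_by_level.items() if count >= 2}
    let robust := articles_by_level.filter (fun p => decide (2 ≤ p.2))
    let pool := if robust = [] then articles_by_level else robust
    -- max(pool.keys(), key=lambda lvl: level_rank.get(lvl, 0)); pool is nonempty so the default is unreachable
    (PySem.List.max? (pool.map (·.1)) pvKey).getD "missing"

-- ===== PORT B =====
-- candidate update: take the new level only when its rank STRICTLY exceeds the current one
def pvBStep (acc : Option (Int × String)) (rank : Int) (lvl : String) : Option (Int × String) :=
  match acc with
  | none => some (rank, lvl)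
  | some (r, l) => if rank > r then some (rank, lvl) else some (r, l)

def compute_overall_level_py_alt (articles_by_level : List (String × Int)) : String :=
  if articles_by_level = [] then "missing"
  else
    let res := articles_by_level.foldl
      (fun (acc : Option (Int × String) × Option (Int × String)) p =>
        (pvBStep acc.1 (pvKey p.1) p.1,
         if 2 ≤ p.2 then pvBStep acc.2 (pvKey p.1) p.1 else acc.2))
      (none, none)
    match res.2 with
    | some (_, l) => l
    | none =>
      match res.1 with
      | some (_, l) => l
      | none => "missing"

-- ===== PRECONDITION & SPEC =====
def Spec_compute_overall_level_py (articles_by_level : List (String × Int)) (out : String) : Prop := out = compute_overall_level_py_alt articles_by_level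
instance (articles_by_level : List (String × Int)) (out : String) : Decidable (Spec_compute_overall_level_py articles_by_level out) := by unfold Spec_compute_overall_level_py; infer_instance

-- ===== CLAIM (what is proved, stated in full; the proofs are below) =====
def Claim_equal_compute_overall_level_py : Prop := ∀ (articles_by_level : List (String × Int)), Dom_compute_overall_level_py articles_by_level → Spec_compute_overall_level_py articles_by_level (compute_overall_level_py articles_by_level)

-- ===== LEMMAS AND PROOFS =====

-- max?'s fold step over keys, named
def pvMaxStep (acc : Option String) (x : String) : Option String :=
  match acc with
  | none => some x
  | some m => if pvKey m < pvKey x then some x else some m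

lemma pv_max?_eq_fold (xs : List String) :
    PySem.List.max? xs pvKey = xs.foldl pvMaxStep none := by
  unfold PySem.List.max?
  apply PySem.List.foldl_congr_mem
  intro acc x _
  cases acc <;> rfl

-- B's single-candidate fold over items mirrors max?'s fold over the mapped keys
lemma pv_bstep_fold (l : List (String × Int)) (o : Option String) :
    l.foldl (fun a p => pvBStep a (pvKey p.1) p.1) (o.map (fun m => (pvKey m, m)))
      = ((l.map (·.1)).foldl pvMaxStep o).map (fun m => (pvKey m, m)) := by
  induction l generalizing o with
  | nil => simp
  | cons p t ih =>
    have hstep : pvBStep (o.map (fun m => (pvKey m, m))) (pvKey p.1) p.1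
        = (pvMaxStep o p.1).map (fun m => (pvKey m, m)) := by
      cases o with
      | none => rfl
      | some m =>
        simp only [Option.map_some, pvBStep, pvMaxStep]
        by_cases h : pvKey m < pvKey p.1 <;> simp [h]
    simpa [List.foldl_cons, hstep] using ih (pvMaxStep o p.1)

lemma pv_bstep_fold_none (l : List (String × Int)) :
    l.foldl (fun a p => pvBStep a (pvKey p.1) p.1) none
      = (PySem.List.max? (l.map (·.1)) pvKey).map (fun m => (pvKey m, m)) := by
  simpa [pv_max?_eq_fold] using pv_bstep_fold l none

lemma pv_max?_nil : PySem.List.max? ([] : List String) pvKey = none := rfl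

lemma pv_max?_some (xs : List String) (h : xs ≠ []) :
    ∃ m, PySem.List.max? xs pvKey = some m := by
  rcases hx : PySem.List.max? xs pvKey with _ | m
  · exact absurd ((PySem.List.max?_eq_none_iff _ _).1 hx) h
  · exact ⟨m, rfl⟩

-- ===== VERDICT (by name: the statement is the Claim_ definition above) =====
theorem compute_overall_level_py_spec : Claim_equal_compute_overall_level_py := by
  intro abl _
  unfold Spec_compute_overall_level_py compute_overall_level_py compute_overall_level_py_alt
  by_cases hnil : abl = []
  · simp [hnil]
  · simp only [hnil, if_false]
    rw [PySem.List.foldl_prod_mk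
        (f := fun a (p : String × Int) => pvBStep a (pvKey p.1) p.1)
        (g := fun a (p : String × Int) =>
          if 2 ≤ p.2 then pvBStep a (pvKey p.1) p.1 else a)]
    rw [PySem.List.foldl_ite_eq_foldl_filter
        (p := fun (p : String × Int) => 2 ≤ p.2)
        (f := fun a (p : String × Int) => pvBStep a (pvKey p.1) p.1)]
    rw [pv_bstep_fold_none abl, pv_bstep_fold_none (abl.filter (fun p => decide (2 ≤ p.2)))]
    by_cases hrob : abl.filter (fun p => decide (2 ≤ p.2)) = []
    · -- no robust level: B's second candidate stays none, both take the overall maximum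
      have hne : abl.map (fun x : String × Int => x.1) ≠ [] := by simp [hnil]
      obtain ⟨m, hm⟩ := pv_max?_some _ hne
      simp [hrob, pv_max?_nil, hm]
    · -- some robust level: both take the maximum over the filtered items
      have hne : (abl.filter (fun p => decide (2 ≤ p.2))).map (fun x : String × Int => x.1) ≠ [] := by
        simp [hrob]
      obtain ⟨m, hm⟩ := pv_max?_some _ hne
      simp [hrob, hm]
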